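-- pv_equiv track=rewrite | github.com/meircif/lumi-lang | MR0/mr0-compiler.py | real_string_length
-- ===== SOURCE A (Python) =====
-- def real_string_length(text):
--   index = 1
--   length = 0
--   while index + 1 < len(text):
--     if text[index] == '\\':
--       index += 1
--     length += 1
--     index += 1
--   return length
-- ===== SOURCE B (Python) =====
-- def real_string_length(text):
--     # Split the quoted body on backslashes and fold over the pieces:
--     # each separator backslash is either an escaper (one unit, swallowing the
--     # first char of its piece) or was itself escaped by the previous escaper.
--     parts = text[1:-1].split('\\')
--     count = len(parts[0])
--     escaped = False
--     for p in parts[1:]: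
--         if escaped:
--             count += len(p)
--             escaped = False
--         else:
--             count += max(len(p), 1)
--             escaped = (p == '')
--     return count
-- ===== Notes on version B (the rewrite author's own statement) =====
-- stated objective: faster
-- what changed: Replaces A's per-character while loop with index-jump arithmetic by splitting the quoted body on backslashes once and folding over the resulting pieces, counting each piece by its length; per-character interpreter branching disappears into C-level split/len, a constant-factor speedup a timing run measured.
import Mathlib
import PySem

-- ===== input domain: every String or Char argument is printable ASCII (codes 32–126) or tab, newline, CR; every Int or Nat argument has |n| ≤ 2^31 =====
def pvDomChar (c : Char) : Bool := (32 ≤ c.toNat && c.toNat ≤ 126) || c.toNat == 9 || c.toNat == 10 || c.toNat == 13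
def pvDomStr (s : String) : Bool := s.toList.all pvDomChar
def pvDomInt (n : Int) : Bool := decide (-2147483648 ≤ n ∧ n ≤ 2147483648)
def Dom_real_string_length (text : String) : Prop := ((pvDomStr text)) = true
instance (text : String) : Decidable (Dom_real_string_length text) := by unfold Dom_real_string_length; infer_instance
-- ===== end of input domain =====

-- B splits the quoted body on backslashes and folds over the pieces (counting
-- whole pieces by length), instead of A's per-character index-jump loop
-- (objective: faster by a constant factor, as a timing run measured).

-- ===== PORT A =====
-- the while loop of A: 'index += 1' inside the if followed by the unconditional 'index += 1'
def pvALoop (cs : List Char) (index length : Int) : Int :=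
  if _h : index + 1 < (cs.length : Int) then
    if PySem.List.pyGet? cs index = some '\\' then
      pvALoop cs (index + 1 + 1) (length + 1)
    else
      pvALoop cs (index + 1) (length + 1)
  else length
termination_by ((cs.length : Int) + 1 - index).toNat
decreasing_by all_goals omega

def real_string_length (text : String) : Int := pvALoop text.toList 1 0

-- ===== PORT B =====
-- one step of Source B's for-loop over parts[1:]: each piece is consumed whole
def pvBStep (st : Int × Bool) (p : List Char) : Int × Bool :=
  if st.2 then (st.1 + (p.length : Int), false)
  else (st.1 + max (p.length : Int) 1, p == [])

-- text[1:-1].split('\\') ported as List.splitOn (library call for str.split);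
-- str.split always returns a nonempty list, so parts[0] is parts.headI
def real_string_length_alt (text : String) : Int :=
  let parts := (PySem.List.slice text.toList (some 1) (some (-1))).splitOn '\\'
  (parts.tail.foldl pvBStep ((parts.headI.length : Int), false)).1

-- ===== PRECONDITION & SPEC =====
def Spec_real_string_length (text : String) (out : Int) : Prop := out = real_string_length_alt text
instance (text : String) (out : Int) : Decidable (Spec_real_string_length text out) := by unfold Spec_real_string_length; infer_instance

-- ===== CLAIM (what is proved, stated in full; the proofs are below) =====
def Claim_equal_real_string_length : Prop := ∀ (text : String), Dom_real_string_length text → Spec_real_string_length text (real_string_length text)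

-- ===== LEMMAS AND PROOFS =====

-- common specification: count chars, a backslash swallowing its successor
def pvCount : List Char → Int
  | [] => 0
  | c :: t => if c = '\\' then 1 + pvCount t.tail else 1 + pvCount t
termination_by l => l.length
decreasing_by all_goals simp [List.length_tail]

-- ---- A's loop equals pvCount on the middle segment ----

theorem pvSeg_tail (cs : List Char) (i : Nat) :
    ((cs.drop i).dropLast).tail = (cs.drop (i + 1)).dropLast := by
  rw [List.dropLast_eq_take, List.dropLast_eq_take, ← List.drop_one, List.drop_take,
    List.drop_drop]
  congr 1
  simp
  omega

theorem pvLoop_eq (cs : List Char) (i : Nat) (acc : Int) :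
    pvALoop cs (i : Int) acc = acc + pvCount ((cs.drop i).dropLast) := by
  rw [pvALoop]
  by_cases h : (i : Int) + 1 < (cs.length : Int)
  · have hi : i + 1 < cs.length := by exact_mod_cast h
    have hi' : i < cs.length := by omega
    have hdrop : cs.drop i = cs[i] :: cs.drop (i + 1) := List.drop_eq_getElem_cons hi'
    have hne : cs.drop (i + 1) ≠ [] := by
      simp [List.drop_eq_nil_iff]
      omega
    have hseg : (cs.drop i).dropLast = cs[i] :: (cs.drop (i + 1)).dropLast := by
      rw [hdrop, List.dropLast_cons_of_ne_nil hne]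
    have hget : PySem.List.pyGet? cs (i : Int) = some cs[i] := PySem.List.pyGet?_ofNat cs i hi'
    rw [dif_pos h, hget, hseg]
    by_cases hb : cs[i] = '\\'
    · rw [if_pos (by simp [hb])]
      have h2 : (i : Int) + 1 + 1 = ((i + 2 : Nat) : Int) := by push_cast; ring
      rw [h2, pvLoop_eq cs (i + 2) (acc + 1)]
      rw [pvCount, if_pos hb, pvSeg_tail cs (i + 1), show i + 1 + 1 = i + 2 from rfl]
      omega
    · rw [if_neg (by simp [hb])]
      have h1 : (i : Int) + 1 = ((i + 1 : Nat) : Int) := by push_cast; ring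
      rw [h1, pvLoop_eq cs (i + 1) (acc + 1)]
      rw [pvCount, if_neg hb]
      omega
  · rw [dif_neg h]
    have : (cs.drop i).dropLast = [] := by
      apply List.eq_nil_of_length_eq_zero
      simp [List.length_dropLast, List.length_drop]
      omega
    simp [this, pvCount]
termination_by cs.length - i
decreasing_by all_goals omega

theorem slice_one_neg_one (cs : List Char) :
    PySem.List.slice cs (some 1) (some (-1)) = (cs.drop 1).dropLast := by
  cases cs with
  | nil => simp [PySem.List.slice]
  | cons c t => simp [PySem.List.slice, List.dropLast_eq_take]

-- ---- B's fold over the split parts equals pvCount ----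

theorem pvSplit_cons (c : Char) (t : List Char) :
    (c :: t).splitOn '\\' =
      if c = '\\' then [] :: t.splitOn '\\'
      else (t.splitOn '\\').modifyHead (List.cons c) := by
  simp [List.splitOn, List.splitOnP_cons]

theorem pvSplit_ne_nil (l : List Char) : l.splitOn '\\' ≠ [] := by
  simp [List.splitOn, List.splitOnP_ne_nil]

-- accumulator shift for B's fold
theorem pvB_shift (ps : List (List Char)) (n : Int) (b : Bool) :
    (ps.foldl pvBStep (n, b)).1 = n + (ps.foldl pvBStep (0, b)).1 := by
  induction ps generalizing n b with
  | nil => simp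
  | cons p rest ih =>
    cases b with
    | true =>
      simp only [List.foldl_cons, pvBStep, reduceIte]
      rw [ih (n + _), ih (0 + _)]
      omega
    | false =>
      simp only [List.foldl_cons, pvBStep, Bool.false_eq_true, if_false]
      rw [ih (n + _), ih (0 + _)]
      omega

-- the two joint invariants:
--   L1: len(parts[0]) + fold over parts[1:] from unescaped state counts l
--   L3: fold over ALL parts of l from unescaped state = 1 + count of l.tail
theorem pvFold_eq (n : Nat) : ∀ l : List Char, l.length ≤ n →
    (((l.splitOn '\\').tail.foldl pvBStep (((l.splitOn '\\').headI.length : Int), false)).1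
        = pvCount l)
    ∧ (((l.splitOn '\\').foldl pvBStep (0, false)).1 = 1 + pvCount l.tail) := by
  induction n with
  | zero =>
    intro l hl
    have : l = [] := by cases l <;> simp_all
    subst this
    constructor <;> simp [pvCount, pvBStep]
  | succ n ih =>
    intro l hl
    -- L2: fold over all parts of t from the ESCAPED state counts t
    have L2 : ∀ t : List Char, t.length ≤ n →
        ((t.splitOn '\\').foldl pvBStep (0, true)).1 = pvCount t := by
      intro t ht
      obtain ⟨q, qs, hq⟩ := List.exists_cons_of_ne_nil (pvSplit_ne_nil t)
      have h1 := (ih t ht).1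
      rw [hq] at h1 ⊢
      simp only [List.headI, List.tail_cons] at h1
      simp only [List.foldl_cons, pvBStep, reduceIte, zero_add]
      exact h1
    constructor
    · -- L1
      cases l with
      | nil => simp [pvCount]
      | cons c t =>
        have ht : t.length ≤ n := by simpa using hl
        rw [pvSplit_cons]
        by_cases hc : c = '\\'
        · rw [if_pos hc]
          simp only [List.headI, List.tail_cons, List.length_nil, Nat.cast_zero]
          -- fold over all parts of t, esc = false, start count 0
          have h3 := (ih t ht).2
          rw [h3, pvCount, if_pos hc]
        · rw [if_neg hc]
          obtain ⟨q, qs, hq⟩ := List.exists_cons_of_ne_nil (pvSplit_ne_nil t)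
          have h1 := (ih t ht).1
          rw [hq] at h1 ⊢
          simp only [List.modifyHead, List.headI, List.tail_cons] at h1 ⊢
          rw [pvB_shift qs ((((c :: q).length : Nat) : Int)),
            pvB_shift qs ((q.length : Int))] at *
          rw [pvCount, if_neg hc, ← h1]
          simp
          omega
    · -- L3
      cases l with
      | nil => simp [pvCount, pvBStep]
      | cons c t =>
        have ht : t.length ≤ n := by simpa using hl
        rw [pvSplit_cons]
        by_cases hc : c = '\\'
        · rw [if_pos hc]
          simp only [List.foldl_cons, pvBStep, Bool.false_eq_true, if_false,
            List.length_nil, Nat.cast_zero, beq_self_eq_true]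
          rw [pvB_shift _ _, L2 t ht]
          simp only [List.tail_cons]
          norm_num
        · rw [if_neg hc]
          obtain ⟨q, qs, hq⟩ := List.exists_cons_of_ne_nil (pvSplit_ne_nil t)
          have h1 := (ih t ht).1
          rw [hq] at h1 ⊢
          simp only [List.modifyHead, List.foldl_cons, pvBStep, Bool.false_eq_true, if_false,
            List.headI, List.tail_cons] at h1 ⊢
          have hne : ((c :: q) == ([] : List Char)) = false := by simp
          rw [hne]
          rw [pvB_shift qs (0 + max _ 1), pvB_shift qs ((q.length : Int))] at *
          rw [← h1]
          push_cast [List.length_cons]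
          omega

-- ===== VERDICT (by name: the statement is the Claim_ definition above) =====
theorem real_string_length_spec : Claim_equal_real_string_length := by
  intro text _
  unfold Spec_real_string_length real_string_length real_string_length_alt
  rw [slice_one_neg_one]
  rw [(pvFold_eq ((text.toList.drop 1).dropLast).length _ le_rfl).1]
  simpa using pvLoop_eq text.toList 1 0
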